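-- pv_equiv track=rewrite | github.com/HZeroxium/restful-api-testing-framework | src/kat/operation_dependency_graph/graph_utils/graph_analyzer.py | ranking_operation_sequences
-- ===== SOURCE A (Python) =====
-- def is_post_operation(operation):
--     return operation.split("-")[0] == "post"
--
-- def ranking_operation_sequences(sequences):
--     min_length_post = float('inf')
--     min_length_get = float('inf')
--     min_length_post_sequences = []
--     min_length_get_sequences = []
--
--     for sequence in sequences:
--         length = len(sequence)
--         first_operation = sequence[0] if length > 0 else None
--
--         if is_post_operation(first_operation):
--             if length < min_length_post:
--                 min_length_post = length
--                 min_length_post_sequences = [sequence]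
--             elif length == min_length_post:
--                 min_length_post_sequences.append(sequence)
--         else:
--             if length < min_length_get:
--                 min_length_get = length
--                 min_length_get_sequences = [sequence]
--             elif length == min_length_get:
--                 min_length_get_sequences.append(sequence)
--
--     if min_length_post_sequences:
--         return min_length_post_sequences
--     else:
--         return min_length_get_sequences
-- ===== SOURCE B (Python) =====
-- def is_post_operation(operation):
--     return operation.split("-")[0] == "post"
--
-- def ranking_operation_sequences(sequences):
--     post = [s for s in sequences if is_post_operation(s[0])]
--     rest = [s for s in sequences if not is_post_operation(s[0])]
--     group = post if post else rest
--     if not group: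
--         return []
--     m = min(len(s) for s in group)
--     return [s for s in group if len(s) == m]
-- ===== Notes on version B (the rewrite author's own statement) =====
-- stated objective: simpler
-- what changed: Replaces A's single interleaved four-variable min-tracking loop by a partition into post/get groups followed by a plain min computation and a filter on the winning group.
import Mathlib
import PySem

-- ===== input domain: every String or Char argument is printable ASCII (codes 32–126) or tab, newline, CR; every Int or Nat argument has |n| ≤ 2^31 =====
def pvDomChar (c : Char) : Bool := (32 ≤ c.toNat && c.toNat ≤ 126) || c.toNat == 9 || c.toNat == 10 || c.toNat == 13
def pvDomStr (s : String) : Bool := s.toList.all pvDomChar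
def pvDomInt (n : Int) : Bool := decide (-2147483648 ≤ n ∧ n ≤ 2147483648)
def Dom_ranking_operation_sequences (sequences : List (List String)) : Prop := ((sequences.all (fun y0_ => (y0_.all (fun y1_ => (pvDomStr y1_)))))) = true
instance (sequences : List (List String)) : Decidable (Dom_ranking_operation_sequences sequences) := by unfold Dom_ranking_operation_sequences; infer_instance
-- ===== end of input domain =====

-- B changes A's interleaved min-tracking loop into partition / min / filter passes (objective: simpler); both raise on an empty inner sequence, excluded by Pre_.

-- ===== PORT A =====
-- is_post_operation: operation.split("-")[0] == "post"; split always returns a nonempty list, so [0] is its head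
-- operation.split("-") = PySem.Str.split? operation "-" (some: sep "-" ≠ ""); split never returns [], so [0] is its head
def pvIsPostOp (operation : String) : Bool := ((PySem.Str.split? operation "-").getD []).headD "" == "post"

-- state: ((min_length_post, min_length_post_sequences), (min_length_get, min_length_get_sequences)); none = float('inf')
def pvGroupStep (st : Option Nat × List (List String)) (s : List String) : Option Nat × List (List String) :=
  if (match st.1 with | none => true | some m => s.length < m) then (some s.length, [s])
  else if st.1 = some s.length then (st.1, st.2 ++ [s])
  else st

def pvStepA (st : (Option Nat × List (List String)) × (Option Nat × List (List String)))
    (s : List String) : (Option Nat × List (List String)) × (Option Nat × List (List String)) :=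
  let first : Option String := if s.length > 0 then PySem.List.pyGet? s 0 else none
  match first with
  | some op => if pvIsPostOp op then (pvGroupStep st.1 s, st.2) else (st.1, pvGroupStep st.2 s)
  | none => (st.1, pvGroupStep st.2 s)  -- Python raises AttributeError here (excluded by Pre_)

def ranking_operation_sequences (sequences : List (List String)) : List (List String) :=
  let st := sequences.foldl pvStepA ((none, []), (none, []))
  if st.1.2 ≠ [] then st.1.2 else st.2.2

-- ===== PORT B =====
def pvIsPostSeq (s : List String) : Bool := pvIsPostOp (s.headD "")  -- B reads s[0]; raises on [] (excluded by Pre_)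

def ranking_operation_sequences_alt (sequences : List (List String)) : List (List String) :=
  let post := sequences.filter pvIsPostSeq
  let rest := sequences.filter (fun s => !pvIsPostSeq s)
  let group := if post ≠ [] then post else rest
  match group with
  | [] => []
  | h :: t =>
      let m := t.foldl (fun acc s => Nat.min acc s.length) h.length  -- min(len(s) for s in group)
      group.filter (fun s => s.length == m)

-- ===== PRECONDITION & SPEC =====
-- Pre_ excludes inputs containing an empty inner sequence: there A raises AttributeError (is_post_operation(None)).
def Pre_ranking_operation_sequences (sequences : List (List String)) : Prop :=
  ∀ s ∈ sequences, s ≠ []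
instance (sequences : List (List String)) : Decidable (Pre_ranking_operation_sequences sequences) := by unfold Pre_ranking_operation_sequences; infer_instance
def pvWitness_ranking_operation_sequences : List (List String) := [["get-a", "x"], ["post-b"], ["post-c"]]

def Spec_ranking_operation_sequences (sequences : List (List String)) (out : List (List String)) : Prop := out = ranking_operation_sequences_alt sequences
instance (sequences : List (List String)) (out : List (List String)) : Decidable (Spec_ranking_operation_sequences sequences out) := by unfold Spec_ranking_operation_sequences; infer_instance

-- ===== CLAIM (what is proved, stated in full; the proofs are below) =====
def Claim_equal_ranking_operation_sequences : Prop := ∀ (sequences : List (List String)), Dom_ranking_operation_sequences sequences → Pre_ranking_operation_sequences sequences → Spec_ranking_operation_sequences sequences (ranking_operation_sequences sequences)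

-- ===== LEMMAS AND PROOFS =====

-- group min, as B computes it, over a whole group
def pvMins (g : List (List String)) : Option Nat := (g.map List.length).min?

theorem pvMins_append (g : List (List String)) (a : List String) :
    pvMins (g ++ [a]) = some (match pvMins g with | none => a.length | some m => Nat.min m a.length) := by
  cases g with
  | nil => simp [pvMins]
  | cons h t => simp [pvMins, List.min?, List.foldl_append]

theorem pvMins_le {g : List (List String)} {m : Nat} (hm : pvMins g = some m)
    {s : List String} (hs : s ∈ g) : m ≤ s.length :=
  (List.min?_eq_some_iff.mp hm).2 _ (List.mem_map_of_mem hs)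

-- the single-group fold computes (min length, elements of minimal length)
theorem pvGroupFold_eq (g : List (List String)) :
    g.foldl pvGroupStep (none, []) =
      (pvMins g, g.filter (fun s => some s.length = pvMins g)) := by
  induction g using List.reverseRecOn with
  | nil => simp [pvMins]
  | append_singleton g a ih =>
    rw [List.foldl_append, ih, List.foldl_cons, List.foldl_nil, pvMins_append]
    cases hg : pvMins g with
    | none =>
      have : g = [] := by
        cases g with
        | nil => rfl
        | cons h t => simp [pvMins, List.min?] at hg
      subst this
      simp [pvGroupStep]
    | some m =>
      simp only [hg]
      by_cases hlt : a.length < m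
      · have hmin : Nat.min m a.length = a.length := Nat.min_eq_right (Nat.le_of_lt hlt)
        simp [pvGroupStep, hlt, hmin, List.filter_append]
        intro s hs
        have hle := pvMins_le hg hs
        omega
      · by_cases heq : a.length = m
        · subst heq
          simp [pvGroupStep, Nat.min_self, List.filter_append]
        · have hmin : Nat.min m a.length = m := Nat.min_eq_left (by omega)
          simp [pvGroupStep, hlt, heq, hmin, List.filter_append, Ne.symm heq]

-- A's per-element branch agrees with B's classifier, so A's fold splits over the partition
theorem pvStepA_split (xs : List (List String))
    (stP stG : Option Nat × List (List String)) :
    xs.foldl pvStepA (stP, stG) =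
      ((xs.filter pvIsPostSeq).foldl pvGroupStep stP,
       (xs.filter (fun s => !pvIsPostSeq s)).foldl pvGroupStep stG) := by
  induction xs generalizing stP stG with
  | nil => simp
  | cons s t ih =>
    cases s with
    | nil =>
      have hp : pvIsPostSeq [] = false := by decide
      simp only [List.foldl_cons, pvStepA, List.length_nil, gt_iff_lt, Nat.lt_irrefl, if_false]
      rw [ih]
      simp [hp]
    | cons c cs =>
      have hfirst : (if (c :: cs).length > 0 then PySem.List.pyGet? (c :: cs) 0 else none) = some c := by
        simp [PySem.List.pyGet?, PySem.List.pyIdx?]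
      have hseq : pvIsPostSeq (c :: cs) = pvIsPostOp c := by simp [pvIsPostSeq]
      by_cases hp : pvIsPostOp c = true
      · simp only [List.foldl_cons, pvStepA, hfirst, hp, if_pos]
        rw [ih]
        simp [hseq, hp]
      · have hp' : pvIsPostOp c = false := by revert hp; cases pvIsPostOp c <;> simp
        simp only [List.foldl_cons, pvStepA, hfirst, hp', Bool.false_eq_true, if_false]
        rw [ih]
        simp [hseq, hp']

-- the minimal-length filter of a nonempty group is nonempty
theorem pvFilter_min_ne_nil {g : List (List String)} (hg : g ≠ []) :
    g.filter (fun s => some s.length = pvMins g) ≠ [] := by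
  cases hm : pvMins g with
  | none =>
    cases g with
    | nil => exact absurd rfl hg
    | cons h t => simp [pvMins, List.min?] at hm
  | some m =>
    have hmem : m ∈ g.map List.length := List.min?_mem hm
    obtain ⟨s, hs, hlen⟩ := List.mem_map.mp hmem
    intro hnil
    have := List.filter_eq_nil_iff.mp hnil s hs
    simp [hlen, hm] at this

-- B's hand-written running min equals pvMins on the cons group
theorem pvSel_cons (h : List String) (t : List (List String)) :
    (h :: t).filter (fun s => s.length == t.foldl (fun acc s => Nat.min acc s.length) h.length) =
    (h :: t).filter (fun s => some s.length = pvMins (h :: t)) := by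
  have hm : pvMins (h :: t) = some (t.foldl (fun acc s => Nat.min acc s.length) h.length) := by
    simp [pvMins, List.min?, List.foldl_map]
  apply List.filter_congr
  intro s _
  rw [hm, Bool.eq_iff_iff]
  simp

-- ===== VERDICT (by name: the statement is the Claim_ definition above) =====
theorem ranking_operation_sequences_spec : Claim_equal_ranking_operation_sequences := by
  intro sequences _ _
  show ranking_operation_sequences sequences = ranking_operation_sequences_alt sequences
  by_cases hpost : sequences.filter pvIsPostSeq = []
  · cases hg : sequences.filter (fun s => !pvIsPostSeq s) with
    | nil =>
      simp only [ranking_operation_sequences, ranking_operation_sequences_alt,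
        pvStepA_split, pvGroupFold_eq, hpost, hg]
      simp
    | cons h t =>
      simp only [ranking_operation_sequences, ranking_operation_sequences_alt,
        pvStepA_split, pvGroupFold_eq, hpost, hg]
      simp only [List.filter_nil, ne_eq, not_true_eq_false, if_false, Bool.false_eq_true]
      exact (pvSel_cons h t).symm
  · have h2 := pvFilter_min_ne_nil hpost
    cases hc : sequences.filter pvIsPostSeq with
    | nil => exact absurd hc hpost
    | cons h t =>
      rw [hc] at h2
      simp only [ranking_operation_sequences, ranking_operation_sequences_alt,
        pvStepA_split, pvGroupFold_eq, hc]
      simp only [ne_eq, h2, not_false_eq_true, if_pos, List.cons_ne_nil]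
      exact (pvSel_cons h t).symm
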